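-- pv_equiv track=rewrite | github.com/aleksclark/sermon_translate | server/src/pipelines/seamless_streaming.py | _dedup_text
-- ===== SOURCE A (Python) =====
-- def _dedup_text(text: str) -> str | None:
--     tokens = text.split()
--     for n in (6, 5, 4, 3, 2):
--         changed = True
--         while changed:
--             changed = False
--             i = 0
--             while i + 2 * n <= len(tokens):
--                 if tokens[i : i + n] == tokens[i + n : i + 2 * n]:
--                     tokens = tokens[: i + n] + tokens[i + 2 * n :]
--                     changed = True
--                 else:
--                     i += 1
--     result = " ".join(tokens).strip()
--     return result or None
-- ===== SOURCE B (Python) =====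
-- def _dedup_text(text: str) -> str | None:
--     tokens = text.split()
--     for n in (6, 5, 4, 3, 2):
--         stack = []
--         for tok in tokens:
--             stack.append(tok)
--             m = len(stack)
--             if m >= 2 * n and stack[m - n :] == stack[m - 2 * n : m - n]:
--                 del stack[m - n :]
--         tokens = stack
--     return " ".join(tokens).strip() or None
-- ===== Notes on version B (the rewrite author's own statement) =====
-- stated objective: alternative
-- what changed: Replaces the rescan-until-fixpoint removal loop per n (rebuild the token list on every removal and restart scanning whenever anything changed) by a single left-to-right stack pass per n that pops the top n-gram when it equals the n-gram just below it; the removal rewriting is confluent, so both compute the same normal form.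
import Mathlib
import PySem

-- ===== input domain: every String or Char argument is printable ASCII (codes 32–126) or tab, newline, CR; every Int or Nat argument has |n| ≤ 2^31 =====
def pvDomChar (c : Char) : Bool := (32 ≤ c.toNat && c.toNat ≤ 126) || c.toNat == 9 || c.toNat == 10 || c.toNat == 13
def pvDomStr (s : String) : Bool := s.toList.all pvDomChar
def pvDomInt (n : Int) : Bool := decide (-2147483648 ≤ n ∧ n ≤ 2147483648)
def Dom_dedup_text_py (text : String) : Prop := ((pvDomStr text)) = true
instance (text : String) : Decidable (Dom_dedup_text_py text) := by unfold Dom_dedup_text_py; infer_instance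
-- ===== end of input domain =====

-- B replaces A's rescan-until-fixpoint removal of adjacent duplicate n-grams by a single
-- left-to-right stack pass per n; the removal rewriting is confluent, so the results agree.

-- ===== PORT A =====

-- inner `while i + 2*n <= len(tokens)` loop of A (carrying the `changed` flag).
-- `fuel` only makes the recursion structural; every call supplies more fuel than the
-- loop can consume (2*len(tokens)+1 steps bound it), so the 0-case is never reached.
def dedupScan (n : Nat) (fuel : Nat) (tokens : List String) (i : Nat) (changed : Bool) :
    List String × Bool :=
  match fuel with
  | 0 => (tokens, changed)
  | fuel + 1 =>
    if i + 2 * n ≤ tokens.length then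
      if PySem.List.slice tokens (some (i : Int)) (some ((i + n : Nat) : Int)) =
         PySem.List.slice tokens (some ((i + n : Nat) : Int)) (some ((i + 2 * n : Nat) : Int)) then
        dedupScan n fuel
          (PySem.List.slice tokens none (some ((i + n : Nat) : Int)) ++
           PySem.List.slice tokens (some ((i + 2 * n : Nat) : Int)) none) i true
      else
        dedupScan n fuel tokens (i + 1) changed
    else
      (tokens, changed)

-- outer `while changed` loop of A (`fuel` as above: each changed pass strictly shrinks
-- the list, so len(tokens)+1 rounds always suffice)
def dedupLoop (n : Nat) (fuel : Nat) (tokens : List String) : List String :=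
  match fuel with
  | 0 => tokens
  | fuel + 1 =>
    let r := dedupScan n (2 * tokens.length + 1) tokens 0 false
    if r.2 then dedupLoop n fuel r.1 else r.1

def dedup_text_py (text : String) : Option String :=
  let t0 := PySem.Str.split₀ text
  let t1 := dedupLoop 6 (t0.length + 1) t0
  let t2 := dedupLoop 5 (t1.length + 1) t1
  let t3 := dedupLoop 4 (t2.length + 1) t2
  let t4 := dedupLoop 3 (t3.length + 1) t3
  let t5 := dedupLoop 2 (t4.length + 1) t4
  let result := PySem.Str.strip (PySem.Str.join " " t5)
  if result = "" then none else some result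

-- ===== PORT B =====

-- body of B's inner `for tok in tokens` loop
def stackPush (n : Nat) (stack : List String) (tok : String) : List String :=
  let s := stack ++ [tok]
  let m := s.length
  if 2 * n ≤ m ∧
      PySem.List.slice s (some ((m - n : Nat) : Int)) none =
        PySem.List.slice s (some ((m - 2 * n : Nat) : Int)) (some ((m - n : Nat) : Int)) then
    PySem.List.slice s none (some ((m - n : Nat) : Int))
  else
    s

-- one pass of B for a given n
def stackPass (n : Nat) (tokens : List String) : List String :=
  tokens.foldl (stackPush n) []

def dedup_text_py_alt (text : String) : Option String :=
  let t0 := PySem.Str.split₀ text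
  let t1 := stackPass 6 t0
  let t2 := stackPass 5 t1
  let t3 := stackPass 4 t2
  let t4 := stackPass 3 t3
  let t5 := stackPass 2 t4
  let result := PySem.Str.strip (PySem.Str.join " " t5)
  if result = "" then none else some result

-- ===== PRECONDITION & SPEC =====
def Spec_dedup_text_py (text : String) (out : Option String) : Prop := out = dedup_text_py_alt text
instance (text : String) (out : Option String) : Decidable (Spec_dedup_text_py text out) := by unfold Spec_dedup_text_py; infer_instance

-- ===== CLAIM (what is proved, stated in full; the proofs are below) =====
def Claim_equal_dedup_text_py : Prop := ∀ (text : String), Dom_dedup_text_py text → Spec_dedup_text_py text (dedup_text_py text)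

-- ===== LEMMAS AND PROOFS =====

-- the n-gram of w starting at i
def blk (w : List String) (i n : Nat) : List String := (w.drop i).take n

-- one removal step: delete the second of two equal adjacent n-grams
def Red (n : Nat) (w w' : List String) : Prop :=
  ∃ i, i + 2 * n ≤ w.length ∧ blk w i n = blk w (i + n) n ∧
    w' = w.take (i + n) ++ w.drop (i + 2 * n)

-- normal form: no two equal adjacent n-grams
def NF (n : Nat) (w : List String) : Prop :=
  ∀ i, i + 2 * n ≤ w.length → blk w i n ≠ blk w (i + n) n

theorem blk_eq_iff (w : List String) (i j n : Nat) :
    blk w i n = blk w j n ↔ ∀ t, t < n → w[i + t]? = w[j + t]? := by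
  rw [List.ext_getElem?_iff]
  constructor
  · intro h t ht
    have := h t
    simpa [blk, List.getElem?_take, List.getElem?_drop, ht] using this
  · intro h t
    by_cases ht : t < n
    · simpa [blk, List.getElem?_take, List.getElem?_drop, ht] using h t ht
    · simp [blk, ht]

theorem surg_getElem? (w : List String) (m k t : Nat) (hm : m ≤ w.length) :
    (w.take m ++ w.drop (m + k))[t]? = if t < m then w[t]? else w[t + k]? := by
  have hlen : (w.take m).length = m := by simp; omega
  by_cases ht : t < m
  · rw [List.getElem?_append_left (by omega), List.getElem?_take, if_pos ht, if_pos ht]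
  · rw [List.getElem?_append_right (by omega), List.getElem?_drop, if_neg ht, hlen]
    congr 1
    omega

theorem surg_length (w : List String) (m k : Nat) (h : m + k ≤ w.length) :
    (w.take m ++ w.drop (m + k)).length = w.length - k := by
  simp; omega

-- overlap distance ≤ n: the two removals give the SAME word
theorem strip_close (w : List String) (n i j : Nat) (hij : i ≤ j) (hjn : j ≤ i + n)
    (hj : j + 2 * n ≤ w.length)
    (Pj : blk w j n = blk w (j + n) n) :
    w.take (i + n) ++ w.drop (i + 2 * n) = w.take (j + n) ++ w.drop (j + 2 * n) := by
  rw [blk_eq_iff] at Pj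
  apply List.ext_getElem?_iff.mpr
  intro t
  rw [show i + 2 * n = (i + n) + n by omega, show j + 2 * n = (j + n) + n by omega,
    surg_getElem? w (i + n) n t (by omega), surg_getElem? w (j + n) n t (by omega)]
  by_cases h1 : t < i + n
  · rw [if_pos h1, if_pos (by omega)]
  · rw [if_neg h1]
    by_cases h2 : t < j + n
    · rw [if_pos h2]
      have := Pj (t - j) (by omega)
      rw [show j + (t - j) = t by omega, show j + n + (t - j) = t + n by omega] at this
      exact this.symm
    · rw [if_neg h2]

-- overlap distance > n: one further step on each side joins them
theorem strip_far (w : List String) (n i j : Nat) (hjn : i + n < j)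
    (hi : i + 2 * n ≤ w.length) (hj : j + 2 * n ≤ w.length)
    (Pi : blk w i n = blk w (i + n) n) (Pj : blk w j n = blk w (j + n) n) :
    ∃ d, Red n (w.take (i + n) ++ w.drop (i + 2 * n)) d ∧
         Red n (w.take (j + n) ++ w.drop (j + 2 * n)) d := by
  rw [blk_eq_iff] at Pi Pj
  set b := w.take (i + n) ++ w.drop (i + 2 * n) with hbdef
  set cw := w.take (j + n) ++ w.drop (j + 2 * n) with hcdef
  have hbget : ∀ x, b[x]? = if x < i + n then w[x]? else w[x + n]? := by
    intro x
    rw [hbdef, show i + 2 * n = (i + n) + n by omega, surg_getElem? w (i + n) n x (by omega)]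
  have hcget : ∀ x, cw[x]? = if x < j + n then w[x]? else w[x + n]? := by
    intro x
    rw [hcdef, show j + 2 * n = (j + n) + n by omega, surg_getElem? w (j + n) n x (by omega)]
  have hblen : b.length = w.length - n := by
    rw [hbdef, show i + 2 * n = (i + n) + n by omega]
    exact surg_length w (i + n) n (by omega)
  have hclen : cw.length = w.length - n := by
    rw [hcdef, show j + 2 * n = (j + n) + n by omega]
    exact surg_length w (j + n) n (by omega)
  refine ⟨b.take j ++ b.drop (j + n), ⟨j - n, ?_, ?_, ?_⟩, ⟨i, ?_, ?_, ?_⟩⟩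
  · omega
  · -- blk b (j-n) n = blk b (j-n+n) n
    rw [show j - n + n = j by omega, blk_eq_iff]
    intro t ht
    rw [hbget (j - n + t), hbget (j + t), if_neg (show ¬ j + t < i + n by omega)]
    have hpj := Pj t ht
    by_cases h1 : j - n + t < i + n
    · rw [if_pos h1]
      have hpi := Pi (j - n + t - i) (by omega)
      rw [show i + (j - n + t - i) = j - n + t by omega,
        show i + n + (j - n + t - i) = j + t by omega] at hpi
      rw [hpi, show j + t + n = j + n + t by omega, ← hpj]
    · rw [if_neg h1, show j - n + t + n = j + t by omega,
        show j + t + n = j + n + t by omega, ← hpj]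
  · rw [show j - n + n = j by omega, show j - n + 2 * n = j + n by omega]
  · omega
  · -- blk cw i n = blk cw (i+n) n
    rw [blk_eq_iff]
    intro t ht
    rw [hcget, hcget, if_pos (by omega), if_pos (by omega)]
    exact Pi t ht
  · -- c.take (i+n) ++ c.drop (i+2n) = b.take j ++ b.drop (j+n)
    apply List.ext_getElem?_iff.mpr
    intro k
    rw [show i + 2 * n = (i + n) + n by omega, surg_getElem? cw (i + n) n k (by omega),
      surg_getElem? b j n k (by omega)]
    by_cases h1 : k < i + n
    · rw [if_pos h1, if_pos (show k < j by omega), hcget k, hbget k,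
        if_pos (show k < j + n by omega), if_pos h1]
    · rw [if_neg h1]
      by_cases h2 : k < j
      · rw [if_pos h2, hcget (k + n), hbget k, if_pos (show k + n < j + n by omega), if_neg h1]
      · rw [if_neg h2, hcget (k + n), hbget (k + n), if_neg (show ¬ k + n < j + n by omega),
          if_neg (show ¬ k + n < i + n by omega)]

-- strong local confluence (the "strip" property)
theorem strip (n : Nat) (w b c : List String) (hb : Red n w b) (hc : Red n w c) :
    ∃ d, Relation.ReflGen (Red n) b d ∧ Relation.ReflGen (Red n) c d := by
  obtain ⟨i, hi, Pi, rfl⟩ := hb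
  obtain ⟨j, hj, Pj, rfl⟩ := hc
  rcases le_total i j with hij | hij
  · by_cases hle : j ≤ i + n
    · refine ⟨_, Relation.ReflGen.refl, ?_⟩
      rw [← strip_close w n i j hij hle hj Pj]
    · obtain ⟨d, h1, h2⟩ := strip_far w n i j (by omega) hi hj Pi Pj
      exact ⟨d, Relation.ReflGen.single h1, Relation.ReflGen.single h2⟩
  · by_cases hle : i ≤ j + n
    · refine ⟨_, ?_, Relation.ReflGen.refl⟩
      rw [← strip_close w n j i hij hle hi Pi]
    · obtain ⟨d, h1, h2⟩ := strip_far w n j i (by omega) hj hi Pj Pi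
      exact ⟨d, Relation.ReflGen.single h2, Relation.ReflGen.single h1⟩

theorem nf_no_step (n : Nat) (w x : List String) (h : NF n w) : ¬ Red n w x := by
  rintro ⟨i, hi, hblk, -⟩; exact h i hi hblk

theorem rtg_nf_eq (n : Nat) (a d : List String) (h : Relation.ReflTransGen (Red n) a d)
    (ha : NF n a) : a = d := by
  rcases Relation.ReflTransGen.cases_head h with rfl | ⟨c, hc, -⟩
  · rfl
  · exact absurd hc (nf_no_step n a c ha)

theorem unique_nf (n : Nat) (w a b : List String)
    (hwa : Relation.ReflTransGen (Red n) w a) (ha : NF n a)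
    (hwb : Relation.ReflTransGen (Red n) w b) (hb : NF n b) : a = b := by
  have hj := Relation.church_rosser
    (fun x y z hxy hxz => by
      rcases strip n x y z hxy hxz with ⟨d, h1, h2⟩
      exact ⟨d, h1, h2.to_reflTransGen⟩) hwa hwb
  rcases hj with ⟨d, had, hbd⟩
  rw [rtg_nf_eq n a d had ha, rtg_nf_eq n b d hbd hb]

-- ===== B-side: the stack pass reaches a normal form =====

theorem blk_take (w : List String) (m i n : Nat) (h : i + n ≤ m) :
    blk (w.take m) i n = blk w i n := by
  simp only [blk]
  rw [List.ext_getElem?_iff]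
  intro t
  rw [List.getElem?_take, List.getElem?_take]
  by_cases ht : t < n
  · rw [if_pos ht, if_pos ht, List.getElem?_drop, List.getElem?_drop, List.getElem?_take,
      if_pos (by omega)]
  · rw [if_neg ht, if_neg ht]

theorem blk_append (w r : List String) (i n : Nat) (h : i + n ≤ w.length) :
    blk (w ++ r) i n = blk w i n := by
  simp only [blk]
  rw [List.ext_getElem?_iff]
  intro t
  rw [List.getElem?_take, List.getElem?_take]
  by_cases ht : t < n
  · rw [if_pos ht, if_pos ht, List.getElem?_drop, List.getElem?_drop,
      List.getElem?_append_left (by omega)]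
  · rw [if_neg ht, if_neg ht]

theorem nf_prefix (n : Nat) (w : List String) (m : Nat) (h : NF n w) : NF n (w.take m) := by
  intro i hi
  have hlen : (w.take m).length = min m w.length := by simp
  rw [blk_take w m i n (by omega), blk_take w m (i + n) n (by omega)]
  exact h i (by omega)

theorem red_append (n : Nat) (w w' r : List String) (h : Red n w w') :
    Red n (w ++ r) (w' ++ r) := by
  obtain ⟨i, hi, hblk, rfl⟩ := h
  refine ⟨i, by simp; omega, ?_, ?_⟩
  · rw [blk_append w r i n (by omega), blk_append w r (i + n) n (by omega)]
    exact hblk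
  · rw [List.take_append_of_le_length (by omega), List.drop_append_of_le_length (by omega)]
    simp

-- stackPush with its let-bindings unfolded
theorem stackPush_eq (n : Nat) (stack : List String) (tok : String) :
    stackPush n stack tok =
      if 2 * n ≤ (stack ++ [tok]).length ∧
          PySem.List.slice (stack ++ [tok]) (some (((stack ++ [tok]).length - n : Nat) : Int))
              none =
            PySem.List.slice (stack ++ [tok])
              (some (((stack ++ [tok]).length - 2 * n : Nat) : Int))
              (some (((stack ++ [tok]).length - n : Nat) : Int)) then
        PySem.List.slice (stack ++ [tok]) none (some (((stack ++ [tok]).length - n : Nat) : Int))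
      else stack ++ [tok] := rfl

-- the block-equality test of stackPush, rewritten through blk
theorem stackPush_cond (n : Nat) (s : List String) (h2n : 2 * n ≤ s.length) :
    (PySem.List.slice s (some ((s.length - n : Nat) : Int)) none =
        PySem.List.slice s (some ((s.length - 2 * n : Nat) : Int))
          (some ((s.length - n : Nat) : Int))) ↔
      blk s (s.length - 2 * n) n = blk s (s.length - 2 * n + n) n := by
  rw [PySem.List.slice_from_natCast, PySem.List.slice_natCast,
    show s.length - n - (s.length - 2 * n) = n by omega]
  unfold blk
  rw [show s.length - 2 * n + n = s.length - n by omega,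
    List.take_of_length_le (l := s.drop (s.length - n)) (by simp; omega)]
  exact ⟨fun h => h.symm, fun h => h.symm⟩

theorem stackPush_spec (n : Nat) (hn : 0 < n) (stack : List String) (tok : String) :
    stackPush n stack tok = stack ++ [tok] ∨
      (Red n (stack ++ [tok]) (stackPush n stack tok) ∧
        stackPush n stack tok = (stack ++ [tok]).take (stack.length + 1 - n)) := by
  rw [stackPush_eq]
  set s := stack ++ [tok] with hs
  split_ifs with hc
  · right
    obtain ⟨h2n, hcond⟩ := hc
    rw [stackPush_cond n s h2n] at hcond
    have hslen : s.length = stack.length + 1 := by rw [hs]; simp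
    constructor
    · refine ⟨s.length - 2 * n, by omega, hcond, ?_⟩
      rw [PySem.List.slice_to_natCast, show s.length - 2 * n + n = s.length - n by omega,
        show s.length - 2 * n + 2 * n = s.length by omega, List.drop_length, List.append_nil]
    · rw [PySem.List.slice_to_natCast, hslen]
  · left
    rfl

theorem stackPush_nf (n : Nat) (hn : 0 < n) (stack : List String) (tok : String)
    (h : NF n stack) : NF n (stackPush n stack tok) := by
  rw [stackPush_eq]
  set s := stack ++ [tok] with hs
  have hslen : s.length = stack.length + 1 := by rw [hs]; simp
  split_ifs with hc
  · -- pop: the result is a prefix of stack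
    rw [PySem.List.slice_to_natCast]
    obtain ⟨h2n, -⟩ := hc
    have : s.take (s.length - n) = stack.take (s.length - n) := by
      rw [hs, List.take_append_of_le_length (by simp; omega)]
    rw [this]
    exact nf_prefix n stack _ h
  · -- no pop: any redex would either be inside stack or be the rejected one
    intro i hi hblk
    by_cases hend : i + 2 * n ≤ stack.length
    · rw [blk_append stack [tok] i n (by omega), blk_append stack [tok] (i + n) n (by omega)]
        at hblk
      exact h i hend hblk
    · have hieq : i = s.length - 2 * n := by omega
      have h2n : 2 * n ≤ s.length := by omega
      exact hc ⟨h2n, (stackPush_cond n s h2n).mpr (hieq ▸ hblk)⟩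

theorem stackPass_spec (n : Nat) (hn : 0 < n) (rest stack : List String) (h : NF n stack) :
    NF n (rest.foldl (stackPush n) stack) ∧
      Relation.ReflTransGen (Red n) (stack ++ rest) (rest.foldl (stackPush n) stack) := by
  induction rest generalizing stack with
  | nil => simpa using ⟨h, Relation.ReflTransGen.refl⟩
  | cons x rest ih =>
    have hnf' := stackPush_nf n hn stack x h
    obtain ⟨ih1, ih2⟩ := ih (stackPush n stack x) hnf'
    refine ⟨ih1, ?_⟩
    have hassoc : stack ++ x :: rest = (stack ++ [x]) ++ rest := by simp
    rw [List.foldl_cons, hassoc]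
    rcases stackPush_spec n hn stack x with heq | ⟨hred, -⟩
    · rw [← heq]
      exact ih2
    · exact Relation.ReflTransGen.head (red_append n (stack ++ [x]) _ rest hred) ih2

-- ===== A-side: the rescan loop reaches a normal form =====

-- A's slice test, rewritten through blk
theorem dedupScan_cond (tokens : List String) (i n : Nat) :
    (PySem.List.slice tokens (some (i : Int)) (some ((i + n : Nat) : Int)) =
        PySem.List.slice tokens (some ((i + n : Nat) : Int)) (some ((i + 2 * n : Nat) : Int))) ↔
      blk tokens i n = blk tokens (i + n) n := by
  rw [show ((i : Int)) = ((i : Nat) : Int) from rfl, PySem.List.slice_natCast,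
    PySem.List.slice_natCast, show i + n - i = n by omega, show i + 2 * n - (i + n) = n by omega]
  exact Iff.rfl

theorem dedupScan_mono (n fuel : Nat) (tokens : List String) (i : Nat) :
    (dedupScan n fuel tokens i true).2 = true := by
  induction fuel generalizing tokens i with
  | zero => rfl
  | succ fuel ih =>
    simp only [dedupScan]
    split_ifs with h1 h2
    · exact ih _ i
    · exact ih tokens (i + 1)
    · rfl

theorem dedupScan_progress (n fuel : Nat) (tokens : List String) (i : Nat) (changed : Bool)
    (hn : 0 < n) (hf : 2 * tokens.length - i < fuel) :
    (dedupScan n fuel tokens i changed).1.length < tokens.length ∨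
      dedupScan n fuel tokens i changed = (tokens, changed) := by
  induction fuel generalizing tokens i changed with
  | zero => exact absurd hf (by omega)
  | succ fuel ih =>
    simp only [dedupScan]
    split_ifs with h1 h2
    · have hlt : (PySem.List.slice tokens none (some ((i + n : Nat) : Int)) ++
          PySem.List.slice tokens (some ((i + 2 * n : Nat) : Int)) none).length <
            tokens.length := by
        simp only [PySem.List.slice_to_natCast, PySem.List.slice_from_natCast,
          List.length_append, List.length_take, List.length_drop]
        omega
      left
      rcases ih (PySem.List.slice tokens none (some ((i + n : Nat) : Int)) ++
          PySem.List.slice tokens (some ((i + 2 * n : Nat) : Int)) none) i true (by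
        simp only [PySem.List.slice_to_natCast, PySem.List.slice_from_natCast,
          List.length_append, List.length_take, List.length_drop]
        omega) with h | h
      · exact h.trans hlt
      · rw [h]; exact hlt
    · exact ih tokens (i + 1) changed (by omega)
    · right; rfl

theorem dedupScan_rtg (n fuel : Nat) (tokens : List String) (i : Nat) (changed : Bool) :
    Relation.ReflTransGen (Red n) tokens (dedupScan n fuel tokens i changed).1 := by
  induction fuel generalizing tokens i changed with
  | zero => exact Relation.ReflTransGen.refl
  | succ fuel ih =>
    simp only [dedupScan]
    split_ifs with h1 h2
    · refine Relation.ReflTransGen.head ?_ (ih _ i true)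
      refine ⟨i, h1, (dedupScan_cond tokens i n).mp h2, ?_⟩
      rw [PySem.List.slice_to_natCast, PySem.List.slice_from_natCast]
    · exact ih tokens (i + 1) changed
    · exact Relation.ReflTransGen.refl

theorem dedupScan_false (n fuel : Nat) (tokens : List String) (i : Nat)
    (hn : 0 < n) (hf : 2 * tokens.length - i < fuel)
    (h2 : (dedupScan n fuel tokens i false).2 = false) :
    (dedupScan n fuel tokens i false).1 = tokens ∧
      ∀ j, i ≤ j → j + 2 * n ≤ tokens.length → blk tokens j n ≠ blk tokens (j + n) n := by
  induction fuel generalizing tokens i with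
  | zero => exact absurd hf (by omega)
  | succ fuel ih =>
    simp only [dedupScan] at h2 ⊢
    split_ifs with h1 hcond
    · rw [if_pos h1, if_pos hcond, dedupScan_mono] at h2
      exact absurd h2 (by simp)
    · rw [if_pos h1, if_neg hcond] at h2
      obtain ⟨hteq, hall⟩ := ih tokens (i + 1) (by omega) h2
      refine ⟨hteq, ?_⟩
      intro j hij hjlen
      rcases Nat.eq_or_lt_of_le hij with rfl | hlt
      · exact fun hblk => hcond ((dedupScan_cond tokens i n).mpr hblk)
      · exact hall j hlt hjlen
    · exact ⟨rfl, fun j hij hjlen => absurd hjlen (by omega)⟩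

theorem dedupLoop_succ (n fuel : Nat) (tokens : List String) :
    dedupLoop n (fuel + 1) tokens =
      if (dedupScan n (2 * tokens.length + 1) tokens 0 false).2 then
        dedupLoop n fuel (dedupScan n (2 * tokens.length + 1) tokens 0 false).1
      else (dedupScan n (2 * tokens.length + 1) tokens 0 false).1 := rfl

theorem dedupLoop_rtg_nf (n fuel : Nat) (tokens : List String) (hn : 0 < n)
    (hF : tokens.length < fuel) :
    Relation.ReflTransGen (Red n) tokens (dedupLoop n fuel tokens) ∧
      NF n (dedupLoop n fuel tokens) := by
  induction fuel generalizing tokens with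
  | zero => exact absurd hF (by omega)
  | succ fuel ih =>
    rw [dedupLoop_succ]
    cases hEq : (dedupScan n (2 * tokens.length + 1) tokens 0 false).2 with
    | false =>
      rw [if_neg (by simp [hEq])]
      obtain ⟨hteq, hall⟩ := dedupScan_false n (2 * tokens.length + 1) tokens 0 hn (by omega) hEq
      rw [hteq]
      exact ⟨Relation.ReflTransGen.refl, fun j hj => hall j (Nat.zero_le j) hj⟩
    | true =>
      rw [if_pos (by simp [hEq])]
      have hlt : (dedupScan n (2 * tokens.length + 1) tokens 0 false).1.length <
          tokens.length := by
        rcases dedupScan_progress n (2 * tokens.length + 1) tokens 0 false hn (by omega)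
          with h | h
        · exact h
        · rw [h] at hEq; simp at hEq
      obtain ⟨ih1, ih2⟩ := ih (dedupScan n (2 * tokens.length + 1) tokens 0 false).1 (by omega)
      exact ⟨Relation.ReflTransGen.trans (dedupScan_rtg n _ tokens 0 false) ih1, ih2⟩

-- ===== both sides compute the unique normal form =====

theorem loop_eq_pass (n : Nat) (hn : 0 < n) (t : List String) :
    dedupLoop n (t.length + 1) t = stackPass n t := by
  obtain ⟨ha1, ha2⟩ := dedupLoop_rtg_nf n (t.length + 1) t hn (by omega)
  have hnf0 : NF n ([] : List String) := by intro i hi _; simp at hi; omega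
  obtain ⟨hb1, hb2⟩ := stackPass_spec n hn t [] hnf0
  simp only [List.nil_append] at hb2
  exact unique_nf n t _ _ ha1 ha2 hb2 hb1

-- ===== VERDICT (by name: the statement is the Claim_ definition above) =====
theorem dedup_text_py_spec : Claim_equal_dedup_text_py := by
  intro text _
  simp only [Spec_dedup_text_py, dedup_text_py, dedup_text_py_alt]
  rw [loop_eq_pass 6 (by omega), loop_eq_pass 5 (by omega), loop_eq_pass 4 (by omega),
    loop_eq_pass 3 (by omega), loop_eq_pass 2 (by omega)]
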